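-- pv_equiv track=rewrite | github.com/CapitanMikon/CodeDocuGenLLM-Master | zdrojaky/src/utility/lod metric.py | calculate_sentences
-- ===== SOURCE A (Python) =====
-- def reformat(text):
--     t = text.replace("/**", "")
--     t = t.replace("*/", "")
--     lines = t.split("\n")
--
--     for i in range(len(lines)):
--         lines[i] = lines[i].strip()
--         lines[i] = lines[i].replace("@param", "")
--         lines[i] = lines[i].replace("@throws", "")
--         lines[i] = lines[i].replace("@return", "")
--         if lines[i].startswith("*"):
--             lines[i] = lines[i][1:]
--
--         lines[i] = lines[i].strip()
--         if len(lines[i]) > 0 and not lines[i].endswith("."):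
--             lines[i] += '.'
--
--     return "\n".join(lines)
--
-- def calculate_sentences(javadoc):
--     edited = reformat(javadoc)
--     l = [x.strip() for x in edited.split(".")]
--
--     total = 0
--     for e in l:
--         if len(e) > 0:
--             total += 1
--
--     return total
-- ===== SOURCE B (Python) =====
-- def calculate_sentences(javadoc):
--     # one accumulating pass: per-line token removal, then a character state-machine
--     # (flush-sentence-on-period scan); no period splitting, no join, no re-strip/append
--     text = javadoc.replace("/**", "").replace("*/", "")
--     total = 0
--     for raw in text.split("\n"):
--         line = raw.strip()
--         for tok in ("@param", "@throws", "@return"):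
--             line = line.replace(tok, "")
--         if line[:1] == "*":
--             line = line[1:]
--         seen = False
--         for c in line:
--             if c == ".":
--                 if seen:
--                     total += 1
--                 seen = False
--             elif not c.isspace():
--                 seen = True
--         if seen:
--             total += 1
--     return total
-- ===== Notes on version B (the rewrite author's own statement) =====
-- stated objective: alternative
-- what changed: B never splits on periods and never joins lines back: it runs a per-line character state-machine (a seen-content flag flushed into the running total at each period and at line end) after removing the tokens, so A's re-strip, conditional period-append, global join and global period-split all disappear.
import Mathlib
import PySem

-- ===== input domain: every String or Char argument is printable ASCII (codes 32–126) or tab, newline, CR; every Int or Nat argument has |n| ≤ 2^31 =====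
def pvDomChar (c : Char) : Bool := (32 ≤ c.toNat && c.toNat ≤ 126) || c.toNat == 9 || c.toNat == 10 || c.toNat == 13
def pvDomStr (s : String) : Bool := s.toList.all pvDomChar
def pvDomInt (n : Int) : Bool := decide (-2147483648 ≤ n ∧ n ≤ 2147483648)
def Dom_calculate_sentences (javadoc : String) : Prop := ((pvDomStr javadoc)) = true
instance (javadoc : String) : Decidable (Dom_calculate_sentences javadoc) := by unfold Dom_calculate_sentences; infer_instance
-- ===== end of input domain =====

-- B counts sentences with a per-line character state-machine (flush on '.') instead of
-- A's reformat / join / global '.'-split / count pipeline; same value, different decomposition.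

-- ===== PORT A =====
-- body of reformat's per-line loop
def pvReformatLineA (line : List Char) : List Char :=
  let l1 := PySem.Chars.strip line
  let l2 := PySem.Chars.replace l1 ['@','p','a','r','a','m'] []
  let l3 := PySem.Chars.replace l2 ['@','t','h','r','o','w','s'] []
  let l4 := PySem.Chars.replace l3 ['@','r','e','t','u','r','n'] []
  let l5 := if PySem.Chars.startswith l4 ['*'] = true then PySem.Chars.slice l4 (some 1) none else l4
  let l6 := PySem.Chars.strip l5
  if 0 < PySem.Chars.len l6 ∧ ¬ PySem.Chars.endswith l6 ['.'] = true then l6 ++ ['.'] else l6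

def pvReformat (text : List Char) : List Char :=
  let t1 := PySem.Chars.replace text ['/','*','*'] []
  let t2 := PySem.Chars.replace t1 ['*','/'] []
  let lines := PySem.Chars.splitOn t2 ['\n']
  let lines2 := lines.map pvReformatLineA
  PySem.Chars.join ['\n'] lines2

def calculate_sentences (javadoc : String) : Int :=
  let edited := pvReformat javadoc.toList
  let l := (PySem.Chars.splitOn edited ['.']).map PySem.Chars.strip
  l.foldl (fun total e => if 0 < PySem.Chars.len e then total + 1 else total) 0

-- ===== PORT B =====
-- the token tuple Source B iterates over
def pvTokensB : List (List Char) :=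
  [['@','p','a','r','a','m'], ['@','t','h','r','o','w','s'], ['@','r','e','t','u','r','n']]

-- the inner 'for c in line' state machine: (seen, total) updated per character,
-- then the final 'if seen: total += 1'
def pvScanB : List Char → Bool → Int → Int
  | [], seen, total => if seen then total + 1 else total
  | c :: rest, seen, total =>
      if c = '.' then pvScanB rest false (if seen then total + 1 else total)
      else if PySem.Chars.isspace c then pvScanB rest seen total
      else pvScanB rest true total

-- one iteration of Source B's outer loop: transform the raw line, run the scan into total
def pvLineB (total : Int) (raw : List Char) : Int :=
  let line := pvTokensB.foldl (fun l tok => PySem.Chars.replace l tok []) (PySem.Chars.strip raw)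
  -- `if line[:1] == "*": line = line[1:]` — exact: line[:1] == "*" iff the head char is '*'
  let line := match line with | '*' :: rest => rest | l => l
  pvScanB line false total

def calculate_sentences_alt (javadoc : String) : Int :=
  let text := PySem.Chars.replace (PySem.Chars.replace javadoc.toList ['/','*','*'] []) ['*','/'] []
  (PySem.Chars.splitOn text ['\n']).foldl pvLineB 0

-- ===== PRECONDITION & SPEC =====
def Spec_calculate_sentences (javadoc : String) (out : Int) : Prop := out = calculate_sentences_alt javadoc
instance (javadoc : String) (out : Int) : Decidable (Spec_calculate_sentences javadoc out) := by unfold Spec_calculate_sentences; infer_instance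

-- ===== CLAIM (what is proved, stated in full; the proofs are below) =====
def Claim_equal_calculate_sentences : Prop := ∀ (javadoc : String), Dom_calculate_sentences javadoc → Spec_calculate_sentences javadoc (calculate_sentences javadoc)

-- ===== LEMMAS AND PROOFS =====

-- proof-only model of splitting on a single-character separator
def pvSplitC (c : Char) : List Char → List (List Char)
  | [] => [[]]
  | a :: t => if a = c then [] :: pvSplitC c t else (pvSplitC c t).modifyHead (a :: ·)

-- the fragment predicate both programs count
def pvNE (f : List Char) : Bool := !(PySem.Chars.strip f).isEmpty

-- proof-only Nat count computed by B's scan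
def pvCnt : List Char → Bool → Nat
  | [], seen => if seen then 1 else 0
  | c :: r, seen =>
      if c = '.' then (if seen then 1 else 0) + pvCnt r false
      else if PySem.Chars.isspace c then pvCnt r seen
      else pvCnt r true

lemma pvSplitC_exists (c : Char) (l : List Char) : ∃ h t, pvSplitC c l = h :: t := by
  induction l with
  | nil => exact ⟨[], [], rfl⟩
  | cons a t ih =>
    obtain ⟨h, t', e⟩ := ih
    by_cases hac : a = c
    · exact ⟨[], pvSplitC c t, by simp [pvSplitC, hac]⟩
    · exact ⟨a :: h, t', by simp [pvSplitC, hac, e]⟩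

lemma pvGo (c : Char) : ∀ (l : List Char) (fuel : Nat) (cur : List Char) (acc : List (List Char)),
    l.length ≤ fuel →
    PySem.Chars.splitOn.go [c] fuel l cur acc
      = acc.reverse ++ (pvSplitC c l).modifyHead (cur.reverse ++ ·) := by
  intro l
  induction l with
  | nil =>
    intro fuel cur acc _
    cases fuel <;> simp [PySem.Chars.splitOn.go, pvSplitC]
  | cons a t ih =>
    intro fuel cur acc hle
    cases fuel with
    | zero => simp at hle
    | succ f =>
      rw [PySem.Chars.splitOn.go.eq_def]
      have hlt : t.length ≤ f := by simpa using hle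
      by_cases hac : c = a
      · have hpre : [c].isPrefixOf (a :: t) = true := by simp [List.isPrefixOf, hac]
        simp only [hpre, if_pos, List.length_cons, List.length_nil, List.drop_succ_cons, List.drop_zero]
        rw [ih f [] (cur.reverse :: acc) hlt]
        obtain ⟨h, t', e⟩ := pvSplitC_exists c t
        simp [pvSplitC, hac.symm, e]
      · have hpre : [c].isPrefixOf (a :: t) = false := by
          simp [List.isPrefixOf]; exact fun h => absurd h hac
        simp only [hpre, Bool.false_eq_true, if_false]
        rw [ih f (a :: cur) acc hlt]
        obtain ⟨h, t', e⟩ := pvSplitC_exists c t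
        have : ¬ a = c := fun h => hac h.symm
        simp [pvSplitC, this, e]

lemma pvSplitOn_eq (c : Char) (l : List Char) : PySem.Chars.splitOn l [c] = pvSplitC c l := by
  rw [PySem.Chars.splitOn, pvGo c l (l.length + 1) [] [] (Nat.le_succ _)]
  obtain ⟨h, t, e⟩ := pvSplitC_exists c l
  simp [e]

lemma pvSplitC_append_sep (c : Char) : ∀ p, pvSplitC c (p ++ [c]) = pvSplitC c p ++ [[]] := by
  intro p
  induction p with
  | nil => simp [pvSplitC]
  | cons a t ih =>
    by_cases hac : a = c
    · simp [pvSplitC, hac, ih]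
    · obtain ⟨h, t', e⟩ := pvSplitC_exists c t
      simp [pvSplitC, hac, ih, e]

lemma pvSplitC_closed_append (c : Char) :
    ∀ (p : List Char) (q : List (List Char)) (b : List Char),
      pvSplitC c p = q ++ [[]] → pvSplitC c (p ++ b) = q ++ pvSplitC c b := by
  intro p
  induction p with
  | nil =>
    intro q b hq
    simp [pvSplitC] at hq
    rcases hq with ⟨rfl, -⟩
    simp
  | cons a t ih =>
    intro q b hq
    by_cases hac : a = c
    · simp only [pvSplitC, hac] at hq ⊢
      cases q with
      | nil =>
        obtain ⟨h, t', e⟩ := pvSplitC_exists c t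
        simp [e] at hq
      | cons q0 qs =>
        simp at hq
        rcases hq with ⟨rfl, hq⟩
        simp [pvSplitC, ih qs b hq]
    · obtain ⟨h, t', e⟩ := pvSplitC_exists c t
      simp only [pvSplitC, hac, e, List.modifyHead_cons] at hq
      cases q with
      | nil => simp at hq
      | cons q0 qs =>
        simp at hq
        rcases hq with ⟨⟨rfl, rfl⟩, rfl⟩
        have hq' : pvSplitC c t = (h :: qs) ++ [[]] := by simp [e]
        have := ih (h :: qs) b hq'
        simp [pvSplitC, hac, this]

lemma pvStrip_ws (w : Char) (hw : PySem.Chars.isspace w = true) (f : List Char) :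
    PySem.Chars.strip (w :: f) = PySem.Chars.strip f := by
  simp [PySem.Chars.strip, PySem.Chars.lstrip, hw]

lemma pvTail_prop (l6 : List Char) :
    (if 0 < PySem.Chars.len l6 ∧ ¬ PySem.Chars.endswith l6 ['.'] = true then l6 ++ ['.'] else l6) = []
      ∨ ∃ q, (if 0 < PySem.Chars.len l6 ∧ ¬ PySem.Chars.endswith l6 ['.'] = true then l6 ++ ['.'] else l6) = q ++ ['.'] := by
  by_cases h : 0 < PySem.Chars.len l6 ∧ ¬ PySem.Chars.endswith l6 ['.'] = true
  · right; exact ⟨l6, by rw [if_pos h]⟩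
  · rw [if_neg h]
    rcases Decidable.not_and_iff_not_or_not.mp h with h1 | h2
    · left
      have h0 : l6.length = 0 := by
        rw [PySem.Chars.len_eq] at h1; omega
      simpa using h0
    · right
      have : PySem.Chars.endswith l6 ['.'] = true := by
        revert h2; cases PySem.Chars.endswith l6 ['.'] <;> simp
      rw [PySem.Chars.endswith_iff] at this
      obtain ⟨q, hq⟩ := this
      exact ⟨q, hq.symm⟩

lemma pvLine_prop (l : List Char) :
    pvReformatLineA l = [] ∨ ∃ q, pvReformatLineA l = q ++ ['.'] := by
  unfold pvReformatLineA
  exact pvTail_prop _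

lemma pvCnt_closed (p : List Char) (hp : p = [] ∨ ∃ q, p = q ++ ['.']) :
    ∃ q, pvSplitC '.' p = q ++ [[]] ∧ (pvSplitC '.' p).countP pvNE = q.countP pvNE := by
  rcases hp with rfl | ⟨q, rfl⟩
  · exact ⟨[], by simp [pvSplitC], by simp [pvSplitC, pvNE, PySem.Chars.strip, PySem.Chars.lstrip, PySem.Chars.rstrip]⟩
  · refine ⟨pvSplitC '.' q, pvSplitC_append_sep '.' q, ?_⟩
    rw [pvSplitC_append_sep '.' q, List.countP_append]
    simp [pvNE, PySem.Chars.strip, PySem.Chars.lstrip, PySem.Chars.rstrip]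

lemma pvIntercalate_cons_cons (s a b : List Char) (t : List (List Char)) :
    List.intercalate s (a :: b :: t) = a ++ s ++ List.intercalate s (b :: t) := by
  simp [List.intercalate, List.intersperse]

lemma pvCountP_modifyHead_newline (x : List Char) :
    ((pvSplitC '.' x).modifyHead ('\n' :: ·)).countP pvNE = (pvSplitC '.' x).countP pvNE := by
  obtain ⟨h, t, e⟩ := pvSplitC_exists '.' x
  rw [e]
  simp only [List.modifyHead_cons, List.countP_cons]
  have : pvNE ('\n' :: h) = pvNE h := by
    simp [pvNE, pvStrip_ws '\n' (by decide) h]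
  rw [this]

lemma pvSum : ∀ ps : List (List Char), (∀ p ∈ ps, p = [] ∨ ∃ q, p = q ++ ['.']) →
    (pvSplitC '.' (List.intercalate ['\n'] ps)).countP pvNE
      = (ps.map (fun p => (pvSplitC '.' p).countP pvNE)).sum := by
  intro ps
  induction ps with
  | nil => intro _; simp [pvSplitC, List.intercalate, pvNE, PySem.Chars.strip, PySem.Chars.lstrip, PySem.Chars.rstrip]
  | cons p rest ih =>
    intro hall
    cases rest with
    | nil => simp [List.intercalate]
    | cons q r =>
      rw [pvIntercalate_cons_cons]
      obtain ⟨qq, e, ec⟩ := pvCnt_closed p (hall p (by simp))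
      have step : pvSplitC '.' (p ++ ['\n'] ++ List.intercalate ['\n'] (q :: r))
          = qq ++ pvSplitC '.' ('\n' :: List.intercalate ['\n'] (q :: r)) := by
        rw [List.append_assoc]
        exact pvSplitC_closed_append '.' p qq _ e
      rw [step, List.countP_append]
      have hnl : pvSplitC '.' ('\n' :: List.intercalate ['\n'] (q :: r))
          = (pvSplitC '.' (List.intercalate ['\n'] (q :: r))).modifyHead ('\n' :: ·) := by
        simp [pvSplitC]
      rw [hnl, pvCountP_modifyHead_newline, ih (fun x hx => hall x (by simp [hx]))]
      have : (pvSplitC '.' p).countP pvNE = qq.countP pvNE := ec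
      simp [this]

-- ===== bridging B's state machine to fragment counting =====

lemma pvScanB_eq : ∀ (l : List Char) (seen : Bool) (total : Int),
    pvScanB l seen total = total + ((pvCnt l seen : Nat) : Int) := by
  intro l
  induction l with
  | nil => intro seen total; cases seen <;> simp [pvScanB, pvCnt]
  | cons c r ih =>
    intro seen total
    by_cases hc : c = '.'
    · cases seen <;> simp [pvScanB, pvCnt, hc, ih] <;> push_cast <;> ring
    · by_cases hs : PySem.Chars.isspace c = true
      · simp [pvScanB, pvCnt, hc, hs, ih]
      · simp [pvScanB, pvCnt, hc, hs, ih]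

lemma pvNE_cons_nonspace (c : Char) (hc : PySem.Chars.isspace c = false) (g : List Char) :
    pvNE (c :: g) = true := by
  simp only [pvNE, PySem.Chars.strip, PySem.Chars.lstrip, List.dropWhile_cons, hc,
    Bool.false_eq_true, if_false, PySem.Chars.rstrip, Bool.not_eq_true']
  rw [List.isEmpty_eq_false_iff]
  intro h
  rw [List.reverse_eq_nil_iff, List.dropWhile_eq_nil_iff] at h
  have := h c (by simp)
  rw [this] at hc
  exact absurd hc (by simp)

lemma pvCnt_split : ∀ (l : List Char) (seen : Bool) (h : List Char) (t : List (List Char)),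
    pvSplitC '.' l = h :: t →
    pvCnt l seen = (if seen || pvNE h then 1 else 0) + t.countP pvNE := by
  intro l
  induction l with
  | nil =>
    intro seen h t e
    simp [pvSplitC] at e
    rcases e with ⟨rfl, rfl⟩
    have : pvNE ([] : List Char) = false := by decide
    cases seen <;> simp [pvCnt, this]
  | cons a r ih =>
    intro seen h t e
    by_cases ha : a = '.'
    · simp only [pvSplitC, ha, if_pos] at e
      injection e with e1 e2
      subst e1; subst e2
      obtain ⟨g0, t', eg⟩ := pvSplitC_exists '.' r
      subst ha
      have h1 : pvCnt ('.' :: r) seen = (if seen then 1 else 0) + pvCnt r false := by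
        simp [pvCnt]
      rw [h1, ih false g0 t' eg, eg, List.countP_cons]
      have hne : pvNE ([] : List Char) = false := by decide
      cases seen <;> cases hb : pvNE g0 <;> simp [hne, hb] <;> ring
    · obtain ⟨g0, t', eg⟩ := pvSplitC_exists '.' r
      simp only [pvSplitC, ha, if_neg, eg, List.modifyHead_cons] at e
      injection e with e1 e2
      subst e1; subst e2
      by_cases hs : PySem.Chars.isspace a = true
      · have hne : pvNE (a :: g0) = pvNE g0 := by simp [pvNE, pvStrip_ws a hs g0]
        simp only [pvCnt, ha, if_neg, hs, if_pos]
        rw [ih seen g0 t' eg, hne]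
        simp [ha]
      · have hne : pvNE (a :: g0) = true :=
          pvNE_cons_nonspace a (by revert hs; cases PySem.Chars.isspace a <;> simp) g0
        simp only [pvCnt, ha, hs]
        rw [ih true g0 t' eg, hne]
        simp [ha, hs]

lemma pvCnt_false_eq_countP (l : List Char) :
    pvCnt l false = (pvSplitC '.' l).countP pvNE := by
  obtain ⟨h, t, e⟩ := pvSplitC_exists '.' l
  rw [e, pvCnt_split l false h t e, List.countP_cons]
  cases hne : pvNE h <;> simp [hne] <;> omega

-- pvCnt invariances: trailing/leading whitespace and a trailing '.' do not change the count
lemma pvCnt_append_dot : ∀ (l : List Char) (seen : Bool), pvCnt (l ++ ['.']) seen = pvCnt l seen := by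
  intro l
  induction l with
  | nil => intro seen; cases seen <;> simp [pvCnt]
  | cons c r ih =>
    intro seen
    by_cases hc : c = '.'
    · simp [pvCnt, hc, ih]
    · by_cases hs : PySem.Chars.isspace c = true
      · simp [pvCnt, hc, hs, ih]
      · simp [pvCnt, hc, hs, ih]

lemma pvCnt_all_ws : ∀ (s : List Char), (∀ c ∈ s, PySem.Chars.isspace c = true) →
    ∀ seen, pvCnt s seen = if seen then 1 else 0 := by
  intro s
  induction s with
  | nil => intro _ seen; simp [pvCnt]
  | cons c r ih =>
    intro hall seen
    have hc : PySem.Chars.isspace c = true := hall c (by simp)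
    have hcd : ¬ c = '.' := by intro h; rw [h] at hc; exact absurd hc (by decide)
    simp [pvCnt, hcd, hc, ih (fun x hx => hall x (by simp [hx])) seen]

lemma pvCnt_append_ws : ∀ (l s : List Char), (∀ c ∈ s, PySem.Chars.isspace c = true) →
    ∀ seen, pvCnt (l ++ s) seen = pvCnt l seen := by
  intro l
  induction l with
  | nil => intro s hall seen; simp [pvCnt, pvCnt_all_ws s hall seen]
  | cons c r ih =>
    intro s hall seen
    by_cases hc : c = '.'
    · simp [pvCnt, hc, ih s hall]
    · by_cases hs : PySem.Chars.isspace c = true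
      · simp [pvCnt, hc, hs, ih s hall]
      · simp [pvCnt, hc, hs, ih s hall]

lemma pvCnt_lstrip (l : List Char) (seen : Bool) :
    pvCnt (PySem.Chars.lstrip l) seen = pvCnt l seen := by
  induction l with
  | nil => rfl
  | cons c r ih =>
    by_cases hs : PySem.Chars.isspace c = true
    · have hcd : ¬ c = '.' := by intro h; rw [h] at hs; exact absurd hs (by decide)
      have h2 : PySem.Chars.lstrip (c :: r) = PySem.Chars.lstrip r := by
        simp [PySem.Chars.lstrip, List.dropWhile_cons, hs]
      rw [h2, ih]
      simp [pvCnt, hcd, hs]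
    · simp [PySem.Chars.lstrip, List.dropWhile_cons, hs]

lemma pvCnt_strip (l : List Char) (seen : Bool) :
    pvCnt (PySem.Chars.strip l) seen = pvCnt l seen := by
  rw [PySem.Chars.strip]
  rw [← pvCnt_lstrip l seen]
  generalize PySem.Chars.lstrip l = m
  have hsplit : m = PySem.Chars.rstrip m ++ (List.takeWhile PySem.Chars.isspace m.reverse).reverse := by
    rw [PySem.Chars.rstrip, ← List.reverse_append, List.takeWhile_append_dropWhile, List.reverse_reverse]
  conv_rhs => rw [hsplit]
  rw [pvCnt_append_ws]
  intro c hc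
  rw [List.mem_reverse] at hc
  exact List.mem_takeWhile_imp hc

-- B's head-'*' match equals A's startswith/slice step
lemma pvDropStar_eq (l : List Char) :
    (match l with | '*' :: rest => rest | l => l)
      = (if PySem.Chars.startswith l ['*'] = true then PySem.Chars.slice l (some 1) none else l) := by
  cases l with
  | nil => decide
  | cons c r =>
    by_cases hc : c = '*'
    · subst hc
      have hsw : PySem.Chars.startswith ('*' :: r) ['*'] = true := by
        rw [PySem.Chars.startswith_iff]; exact ⟨r, rfl⟩
      rw [if_pos hsw]
      simp [PySem.Chars.slice_eq_listSlice, PySem.List.slice_from_one]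
    · have hsw : ¬ PySem.Chars.startswith (c :: r) ['*'] = true := by
        rw [PySem.Chars.startswith_iff]
        rintro ⟨t, ht⟩
        injection ht with h1
        exact hc h1.symm
      rw [if_neg hsw]
      cases r <;> simp [hc]

-- A's final strip / conditional '.'-append does not change the fragment count = scan count
lemma pvCnt_tail (l5 : List Char) :
    (pvSplitC '.' (if 0 < PySem.Chars.len (PySem.Chars.strip l5) ∧ ¬ PySem.Chars.endswith (PySem.Chars.strip l5) ['.'] = true
        then PySem.Chars.strip l5 ++ ['.'] else PySem.Chars.strip l5)).countP pvNE = pvCnt l5 false := by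
  rw [← pvCnt_false_eq_countP]
  by_cases h : 0 < PySem.Chars.len (PySem.Chars.strip l5) ∧ ¬ PySem.Chars.endswith (PySem.Chars.strip l5) ['.'] = true
  · rw [if_pos h, pvCnt_append_dot, pvCnt_strip]
  · rw [if_neg h, pvCnt_strip]

set_option maxHeartbeats 1000000 in
-- per-line bridge: one B-loop iteration = total + count of A's reformatted line fragments
lemma pvLineB_eq (total : Int) (raw : List Char) :
    pvLineB total raw
      = total + (((pvSplitC '.' (pvReformatLineA raw)).countP pvNE : Nat) : Int) := by
  simp only [pvLineB, pvReformatLineA, pvTokensB, List.foldl_cons, List.foldl_nil]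
  rw [pvScanB_eq, pvDropStar_eq, pvCnt_tail]

set_option maxHeartbeats 1600000 in
lemma pvFoldB : ∀ (L : List (List Char)) (total : Int),
    L.foldl pvLineB total
      = total + (L.map (fun raw => (((pvSplitC '.' (pvReformatLineA raw)).countP pvNE : Nat) : Int))).sum := by
  intro L
  induction L with
  | nil =>
    intro total
    simp only [List.foldl_nil, List.map_nil, List.sum_nil]
    omega
  | cons a t ih =>
    intro total
    simp only [List.foldl_cons, List.map_cons, List.sum_cons]
    rw [ih, pvLineB_eq]
    omega

lemma pvSumCast (L : List (List Char)) (f : List Char → Nat) :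
    (L.map (fun x => ((f x : Nat) : Int))).sum = (((L.map f).sum : Nat) : Int) := by
  induction L with
  | nil => simp
  | cons a t ih => simp [ih]

set_option maxHeartbeats 1000000 in
lemma pvMain : ∀ (javadoc : String), calculate_sentences javadoc = calculate_sentences_alt javadoc := by
  intro j
  rw [calculate_sentences, calculate_sentences_alt, pvReformat]
  rw [pvFoldB]
  have hfa : (fun (tot : Int) (e : List Char) => if 0 < PySem.Chars.len e then tot + 1 else tot)
      = (fun tot e => if (decide (0 < PySem.Chars.len e)) = true then tot + 1 else tot) := by
    funext tot e; simp
  rw [hfa, PySem.List.foldl_count_if]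
  rw [List.countP_map, pvSplitOn_eq]
  have hp : ((fun e => decide (0 < PySem.Chars.len e)) ∘ PySem.Chars.strip) = pvNE := by
    funext f
    simp only [Function.comp, pvNE, PySem.Chars.len_eq]
    cases PySem.Chars.strip f <;> simp
  rw [hp]
  have hjoin : PySem.Chars.join ['\n'] ((PySem.Chars.splitOn (PySem.Chars.replace (PySem.Chars.replace j.toList ['/','*','*'] []) ['*','/'] []) ['\n']).map pvReformatLineA)
      = List.intercalate ['\n'] ((PySem.Chars.splitOn (PySem.Chars.replace (PySem.Chars.replace j.toList ['/','*','*'] []) ['*','/'] []) ['\n']).map pvReformatLineA) := rfl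
  rw [hjoin]
  rw [pvSum _ (by
    intro p hp
    simp only [List.mem_map] at hp
    obtain ⟨x, -, rfl⟩ := hp
    exact pvLine_prop x)]
  rw [List.map_map]
  rw [pvSumCast _ (fun raw => (pvSplitC '.' (pvReformatLineA raw)).countP pvNE)]
  simp [Function.comp_def]

-- ===== VERDICT (by name: the statement is the Claim_ definition above) =====
theorem calculate_sentences_spec : Claim_equal_calculate_sentences := by
  intro javadoc _
  unfold Spec_calculate_sentences
  exact pvMain javadoc
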